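-- pv_equiv track=rewrite | github.com/heqin-zhu/structRFM | tasks/Zfold/cal_eRMSD.py | _find_subsequence_indices
-- ===== SOURCE A (Python) =====
-- def _find_subsequence_indices(super_seq: str, sub_seq: str):
--     i = 0
--     pick = []
--     for ch in sub_seq:
--         while i < len(super_seq) and super_seq[i] != ch:
--             i += 1
--         if i >= len(super_seq):
--             return None
--         pick.append(i)
--         i += 1
--     return pick
-- ===== SOURCE B (Python) =====
-- def _find_subsequence_indices(super_seq: str, sub_seq: str):
--     # Index super_seq once: char -> ascending list of its positions.
--     positions = {}
--     for idx, ch in enumerate(super_seq):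
--         positions.setdefault(ch, []).append(idx)
--     pick = []
--     nxt = 0
--     for ch in sub_seq:
--         ps = positions.get(ch, [])
--         # binary search: first position in ps that is >= nxt
--         lo, hi = 0, len(ps)
--         while lo < hi:
--             mid = (lo + hi) // 2
--             if ps[mid] < nxt:
--                 lo = mid + 1
--             else:
--                 hi = mid
--         if lo == len(ps):
--             return None
--         pick.append(ps[lo])
--         nxt = ps[lo] + 1
--     return pick
-- ===== Notes on version B (the rewrite author's own statement) =====
-- stated objective: alternative
-- what changed: B first builds a char-to-sorted-positions index of super_seq in one pass, then for each sub_seq character binary-searches that character's position list for the first position >= the previous pick + 1, instead of A's single pointer advanced by a nested while-scan.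
import Mathlib
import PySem

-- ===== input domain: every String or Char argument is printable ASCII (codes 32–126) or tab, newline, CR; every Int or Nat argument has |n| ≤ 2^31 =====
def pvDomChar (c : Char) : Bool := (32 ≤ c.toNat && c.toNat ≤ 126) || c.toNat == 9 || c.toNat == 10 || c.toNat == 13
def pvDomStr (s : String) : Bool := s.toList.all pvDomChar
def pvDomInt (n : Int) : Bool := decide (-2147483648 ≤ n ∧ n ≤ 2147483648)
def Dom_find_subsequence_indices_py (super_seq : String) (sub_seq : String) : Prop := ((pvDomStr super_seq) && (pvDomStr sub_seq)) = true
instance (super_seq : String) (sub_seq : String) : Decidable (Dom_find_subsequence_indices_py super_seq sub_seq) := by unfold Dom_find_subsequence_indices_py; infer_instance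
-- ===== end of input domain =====

-- B replaces A's left-to-right while-scan with a precomputed char→positions index of
-- super_seq plus a hand-written binary search per sub_seq character (alternative algorithm;
-- same return value).

-- ===== PORT A =====
-- the inner `while i < len(super_seq) and super_seq[i] != ch: i += 1`
def pvAWhile (sup : List Char) (ch : Char) (i : Nat) : Nat :=
  if i < sup.length ∧ sup.getD i ' ' ≠ ch then pvAWhile sup ch (i + 1) else i
termination_by sup.length - i
decreasing_by omega

-- the outer `for ch in sub_seq` loop carrying `i` and `pick`
def pvALoop (sup : List Char) (i : Nat) (pick : List Int) : List Char → Option (List Int)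
  | [] => some pick
  | ch :: rest =>
    let i' := pvAWhile sup ch i
    if i' ≥ sup.length then none
    else pvALoop sup (i' + 1) (pick ++ [(i' : Int)]) rest

def find_subsequence_indices_py (super_seq : String) (sub_seq : String) : Option (List Int) :=
  pvALoop super_seq.toList 0 [] sub_seq.toList

-- ===== PORT B =====
-- the hand-written `while lo < hi` binary search of Source B; lo, hi are nonnegative Python ints
-- (list indices), so Nat with Nat division is exact for `(lo + hi) // 2`; `ps[mid]` is in
-- range (0 ≤ lo ≤ mid < hi ≤ len ps), so getD is exact
def pvBsearch (ps : List Int) (x : Int) (lo hi : Nat) : Nat :=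
  if lo < hi then
    let mid := (lo + hi) / 2
    if ps.getD mid 0 < x then pvBsearch ps x (mid + 1) hi else pvBsearch ps x lo mid
  else lo
termination_by hi - lo
decreasing_by all_goals omega

-- the `for ch in sub_seq` loop of Source B carrying `nxt` and `pick`
def pvBLoop (pos : PySem.Dict Char (List Int)) (nxt : Int) (pick : List Int) :
    List Char → Option (List Int)
  | [] => some pick
  | ch :: rest =>
    let ps := pos.getD ch []
    let lo := pvBsearch ps nxt 0 ps.length
    if lo = ps.length then none
    else pvBLoop pos (ps.getD lo 0 + 1) (pick ++ [ps.getD lo 0]) rest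

def find_subsequence_indices_py_alt (super_seq : String) (sub_seq : String) : Option (List Int) :=
  -- `positions.setdefault(ch, []).append(idx)` over `enumerate(super_seq)`: key ch ends up
  -- bound to its old list (default []) with idx appended, i.e. Dict.modify ch [] (· ++ [idx])
  let pos := (PySem.List.enumerate super_seq.toList 0).foldl
      (fun d p => d.modify p.2 [] (· ++ [p.1])) PySem.Dict.empty
  pvBLoop pos 0 [] sub_seq.toList

-- ===== PRECONDITION & SPEC =====
def Spec_find_subsequence_indices_py (super_seq : String) (sub_seq : String) (out : Option (List Int)) : Prop := out = find_subsequence_indices_py_alt super_seq sub_seq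
instance (super_seq : String) (sub_seq : String) (out : Option (List Int)) : Decidable (Spec_find_subsequence_indices_py super_seq sub_seq out) := by unfold Spec_find_subsequence_indices_py; infer_instance

-- ===== CLAIM (what is proved, stated in full; the proofs are below) =====
def Claim_equal_find_subsequence_indices_py : Prop := ∀ (super_seq : String) (sub_seq : String), Dom_find_subsequence_indices_py super_seq sub_seq → Spec_find_subsequence_indices_py super_seq sub_seq (find_subsequence_indices_py super_seq sub_seq)

-- ===== LEMMAS AND PROOFS =====

-- the ascending list of positions of ch in sup (what Source B's dict stores under ch)
def pvOcc (sup : List Char) (ch : Char) : List Int :=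
  ((PySem.List.enumerate sup 0).filter (fun p => p.2 == ch)).map (·.1)

theorem pv_pos_getD (sup : List Char) (ch : Char) :
    ((PySem.List.enumerate sup 0).foldl
        (fun d p => d.modify p.2 [] (· ++ [p.1])) PySem.Dict.empty).getD ch []
      = pvOcc sup ch := by
  have h1 : (PySem.List.enumerate sup 0).foldl
      (fun d p => d.modify p.2 [] (· ++ [p.1])) PySem.Dict.empty
      = ((PySem.List.enumerate sup 0).map Prod.swap).foldl
        (fun d q => d.modify q.1 [] (· ++ [q.2])) PySem.Dict.empty := by
    rw [List.foldl_map]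
    rfl
  rw [h1, PySem.Dict.getD_foldl_modify_append, PySem.Dict.getD_empty]
  simp [pvOcc, List.filter_map, Function.comp_def]

theorem pv_mem_occ (sup : List Char) (ch : Char) (x : Int) :
    x ∈ pvOcc sup ch ↔ ∃ k : Nat, k < sup.length ∧ x = (k : Int) ∧ sup.getD k ' ' = ch := by
  unfold pvOcc
  simp only [List.mem_map, List.mem_filter, PySem.List.mem_enumerate_iff]
  constructor
  · rintro ⟨p, ⟨⟨k, hk, hp⟩, hfil⟩, hx⟩
    subst hp
    refine ⟨k, hk, by simpa using hx.symm, ?_⟩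
    rw [List.getD_eq_getElem _ _ hk]
    simpa using hfil
  · rintro ⟨k, hk, hx, hch⟩
    refine ⟨((k : Int), sup[k]), ⟨⟨k, hk, by simp⟩, ?_⟩, by simpa using hx.symm⟩
    rw [List.getD_eq_getElem _ _ hk] at hch
    simpa using hch

theorem pv_occ_mono (sup : List Char) (ch : Char) :
    ∀ p q, p < q → q < (pvOcc sup ch).length →
      (pvOcc sup ch).getD p 0 < (pvOcc sup ch).getD q 0 := by
  have hpw : (pvOcc sup ch).Pairwise (· < ·) := by
    unfold pvOcc
    exact ((PySem.List.pairwise_lt_enumerate sup 0).filter _).map _ (fun _ _ h => h)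
  intro p q hpq hq
  rw [List.getD_eq_getElem _ _ (by omega), List.getD_eq_getElem _ _ hq]
  exact List.pairwise_iff_getElem.mp hpw p q (by omega) hq hpq

-- characterization of A's inner while loop: it stops at the first occurrence ≥ i (or at len)
theorem pvAWhile_spec (sup : List Char) (ch : Char) :
    ∀ n i, sup.length - i ≤ n → i ≤ sup.length →
      i ≤ pvAWhile sup ch i ∧ pvAWhile sup ch i ≤ sup.length ∧
      (∀ k, i ≤ k → k < pvAWhile sup ch i → sup.getD k ' ' ≠ ch) ∧
      (pvAWhile sup ch i < sup.length → sup.getD (pvAWhile sup ch i) ' ' = ch) := by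
  intro n
  induction n with
  | zero =>
    intro i hn hi
    have hlen : i = sup.length := by omega
    rw [pvAWhile, if_neg (by omega)]
    exact ⟨le_refl _, by omega, fun k hk1 hk2 => absurd hk2 (by omega), fun h => absurd h (by omega)⟩
  | succ n ih =>
    intro i hn hi
    by_cases hcond : i < sup.length ∧ sup.getD i ' ' ≠ ch
    · rw [pvAWhile, if_pos hcond]
      obtain ⟨h1, h2, h3, h4⟩ := ih (i + 1) (by omega) (by omega)
      refine ⟨by omega, h2, ?_, h4⟩
      intro k hk1 hk2
      rcases Nat.eq_or_lt_of_le hk1 with h | h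
      · rw [← h]; exact hcond.2
      · exact h3 k h hk2
    · rw [pvAWhile, if_neg hcond]
      push Not at hcond
      refine ⟨le_refl _, hi, fun k hk1 hk2 => absurd hk2 (by omega), fun h => hcond h⟩

-- characterization of Source B's binary search: first position in ps holding a value ≥ x
theorem pvBsearch_spec (ps : List Int) (x : Int)
    (hmono : ∀ p q, p < q → q < ps.length → ps.getD p 0 < ps.getD q 0) :
    ∀ n lo hi, hi - lo ≤ n → lo ≤ hi → hi ≤ ps.length →
      (∀ m, m < lo → ps.getD m 0 < x) → (∀ m, hi ≤ m → m < ps.length → x ≤ ps.getD m 0) →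
      pvBsearch ps x lo hi ≤ ps.length ∧
      (∀ m, m < pvBsearch ps x lo hi → ps.getD m 0 < x) ∧
      (∀ m, pvBsearch ps x lo hi ≤ m → m < ps.length → x ≤ ps.getD m 0) := by
  intro n
  induction n with
  | zero =>
    intro lo hi hn hlh hhp hlow hhigh
    have h : ¬ lo < hi := by omega
    rw [pvBsearch, if_neg h]
    exact ⟨by omega, hlow, fun m hm1 hm2 => hhigh m (by omega) hm2⟩
  | succ n ih =>
    intro lo hi hn hlh hhp hlow hhigh
    by_cases h : lo < hi
    · rw [pvBsearch, if_pos h]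
      simp only
      by_cases hmid : ps.getD ((lo + hi) / 2) 0 < x
      · rw [if_pos hmid]
        refine ih ((lo + hi) / 2 + 1) hi (by omega) (by omega) hhp ?_ hhigh
        intro m hm
        rcases Nat.lt_or_ge m ((lo + hi) / 2) with h' | h'
        · exact lt_trans (hmono m ((lo + hi) / 2) h' (by omega)) hmid
        · have : m = (lo + hi) / 2 := by omega
          rw [this]; exact hmid
      · rw [if_neg hmid]
        push Not at hmid
        refine ih lo ((lo + hi) / 2) (by omega) (by omega) (by omega) hlow ?_
        intro m hm1 hm2
        rcases Nat.eq_or_lt_of_le hm1 with h' | h'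
        · rw [← h']; exact hmid
        · exact le_trans hmid (le_of_lt (hmono ((lo + hi) / 2) m h' hm2))
    · rw [pvBsearch, if_neg h]
      exact ⟨by omega, hlow, fun m hm1 hm2 => hhigh m (by omega) hm2⟩

-- main invariant: A's loop from position i equals B's loop with nxt = i over the index
theorem pv_main (sup : List Char)
    (pos : PySem.Dict Char (List Int)) (hpos : ∀ ch, pos.getD ch [] = pvOcc sup ch) :
    ∀ (sub : List Char) (i : Nat) (pick : List Int), i ≤ sup.length →
      pvALoop sup i pick sub = pvBLoop pos (i : Int) pick sub := by
  intro sub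
  induction sub with
  | nil => intro i pick _; rfl
  | cons ch rest ih =>
    intro i pick hi
    simp only [pvALoop, pvBLoop, hpos ch]
    set ps := pvOcc sup ch with hps
    obtain ⟨hb1, hb2, hb3⟩ := pvBsearch_spec ps (i : Int) (pv_occ_mono sup ch)
      ps.length 0 ps.length (by omega) (by omega) (le_refl _)
      (fun m hm => absurd hm (by omega)) (fun m hm1 hm2 => absurd (lt_of_le_of_lt hm1 hm2) (by omega))
    set lo := pvBsearch ps (i : Int) 0 ps.length with hlo
    obtain ⟨ha1, ha2, ha3, ha4⟩ := pvAWhile_spec sup ch sup.length i (by omega) hi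
    set i' := pvAWhile sup ch i with hi'
    by_cases hcase : lo = ps.length
    · -- every occurrence is < i, so A's while runs off the end: both return none
      have hend : i' = sup.length := by
        rcases Nat.eq_or_lt_of_le ha2 with h | h
        · exact h
        · exfalso
          have hch := ha4 h
          have hmem : ((i' : Int)) ∈ ps := (pv_mem_occ sup ch _).mpr ⟨i', h, rfl, hch⟩
          obtain ⟨q, hq, hqv⟩ := List.mem_iff_getElem.mp hmem
          have : ps.getD q 0 < (i : Int) := hb2 q (hcase ▸ hq)
          rw [List.getD_eq_getElem _ _ hq, hqv] at this
          exact absurd this (by exact_mod_cast not_lt.mpr (by exact_mod_cast ha1))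
      rw [if_pos (by omega), if_pos hcase]
    · -- ps[lo] is the first occurrence ≥ i, and A's while stops exactly there
      have hlt : lo < ps.length := by omega
      have hv : ps.getD lo 0 ∈ ps := by
        rw [List.getD_eq_getElem _ _ hlt]; exact List.getElem_mem _
      obtain ⟨m, hm, hveq, hmch⟩ := (pv_mem_occ sup ch _).mp hv
      have hge : (i : Int) ≤ ps.getD lo 0 := hb3 lo (le_refl _) hlt
      have him : i ≤ m := by rw [hveq] at hge; exact_mod_cast hge
      have heq : i' = m := by
        have hlt' : i' < sup.length := by
          rcases Nat.eq_or_lt_of_le ha2 with h | h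
          · exfalso; exact ha3 m him (by omega) hmch
          · exact h
        have h1 : i' ≤ m := by
          by_contra h
          exact ha3 m him (by omega) hmch
        have h2 : m ≤ i' := by
          have hmem : ((i' : Int)) ∈ ps := (pv_mem_occ sup ch _).mpr ⟨i', hlt', rfl, ha4 hlt'⟩
          obtain ⟨q, hq, hqv⟩ := List.mem_iff_getElem.mp hmem
          have hloq : lo ≤ q := by
            by_contra h
            have : ps.getD q 0 < (i : Int) := hb2 q (by omega)
            rw [List.getD_eq_getElem _ _ hq, hqv] at this
            exact absurd this (not_lt.mpr (by exact_mod_cast ha1))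
          have : ps.getD lo 0 ≤ ps.getD q 0 := by
            rcases Nat.eq_or_lt_of_le hloq with h' | h'
            · rw [h']
            · exact le_of_lt (pv_occ_mono sup ch lo q h' hq)
          rw [List.getD_eq_getElem _ _ hq, hqv, hveq] at this
          exact_mod_cast this
        omega
      rw [if_neg (by omega), if_neg hcase]
      have hout : ps.getD lo 0 = ((i' : Nat) : Int) := by rw [hveq, heq]
      rw [hout]
      have := ih (i' + 1) (pick ++ [((i' : Nat) : Int)]) (by omega)
      push_cast at this ⊢
      exact this

-- ===== VERDICT (by name: the statement is the Claim_ definition above) =====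
theorem find_subsequence_indices_py_spec : Claim_equal_find_subsequence_indices_py := by
  intro super_seq sub_seq _
  unfold Spec_find_subsequence_indices_py find_subsequence_indices_py find_subsequence_indices_py_alt
  exact pv_main super_seq.toList _ (fun ch => pv_pos_getD super_seq.toList ch)
    sub_seq.toList 0 [] (Nat.zero_le _)
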